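-- pv_equiv track=rewrite | github.com/Vineyardcode/voynich_slop | scripts/slot_analysis.py | find_paradigms
-- ===== SOURCE A (Python) =====
-- from collections import Counter, defaultdict
--
-- ZONE_NAMES = {
--     0: "prefix.initial", 1: "prefix.glide", 2: "prefix.liquid",
--     3: "root.gallows", 4: "root.compound", 5: "root.bench",
--     6: "root.mid", 7: "root.vowel",
--     9: "suffix.i-series", 10: "suffix.final", 11: "suffix.terminal",
-- }
--
-- def find_paradigms(decomposed_words, min_count=5):
--     """
--     Find paradigmatic sets: groups of words identical except in one slot.
--     These reveal which slots carry grammatical vs semantic information.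
--     """
--     paradigms = defaultdict(lambda: defaultdict(int))
--
--     for word, (slots, _) in decomposed_words.items():
--         filled_slots = sorted(slots.keys())
--         # For each filled slot, create a template with that slot blanked
--         for blank_slot in filled_slots:
--             template_parts = []
--             for s in filled_slots:
--                 if s == blank_slot:
--                     template_parts.append(f"[{ZONE_NAMES.get(s, s)}=___]")
--                 else:
--                     template_parts.append(f"{s}:{slots[s]}")
--             template = " ".join(template_parts)
--             paradigms[template][slots[blank_slot]] += 1
--
--     # Keep only paradigms where the blanked slot has multiple values
--     real_paradigms = {}
--     for template, values in paradigms.items():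
--         if len(values) >= 2 and sum(values.values()) >= min_count:
--             real_paradigms[template] = dict(values)
--
--     return real_paradigms
-- ===== SOURCE B (Python) =====
-- ZONE_NAMES = {
--     0: "prefix.initial", 1: "prefix.glide", 2: "prefix.liquid",
--     3: "root.gallows", 4: "root.compound", 5: "root.bench",
--     6: "root.mid", 7: "root.vowel",
--     9: "suffix.i-series", 10: "suffix.final", 11: "suffix.terminal",
-- }
--
-- def find_paradigms(decomposed_words, min_count=5):
--     """
--     Find paradigmatic sets: groups of words identical except in one slot.
--     These reveal which slots carry grammatical vs semantic information.
--     """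
--     # Per word: cumulative prefix/suffix join arrays replace A's per-blank
--     # rescan-and-join of every slot; each template is one three-piece concat.
--     counts = {}
--     for word, (slots, _) in decomposed_words.items():
--         filled = sorted(slots)
--         parts = [f"{s}:{slots[s]}" for s in filled]
--         pre = [""]          # pre[i] = parts[:i] joined, each part followed by " "
--         cur = ""
--         for p in parts:
--             cur = cur + p + " "
--             pre.append(cur)
--         suf = [""]          # suf[i] = parts[i:] joined, each part preceded by " "
--         cur = ""
--         for p in reversed(parts):
--             cur = " " + p + cur
--             suf.append(cur)
--         suf.reverse()
--         for i, s in enumerate(filled):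
--             template = pre[i] + f"[{ZONE_NAMES.get(s, s)}=___]" + suf[i + 1]
--             vals = counts.setdefault(template, {})
--             v = slots[s]
--             vals[v] = vals.get(v, 0) + 1
--     return {t: v for t, v in counts.items()
--             if len(v) >= 2 and sum(v.values()) >= min_count}
-- ===== Notes on version B (the rewrite author's own statement) =====
-- stated objective: alternative
-- what changed: Instead of A's per-blanked-slot rebuild (rescan every filled slot with an if/else and join the whole part list for each blank), B computes per word two cumulative join arrays in one forward and one backward scan (prefix joins with trailing spaces, suffix joins with leading spaces) and forms each template as a single three-piece concatenation, accumulating into a plain dict via setdefault/get instead of nested defaultdicts.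
import Mathlib
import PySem

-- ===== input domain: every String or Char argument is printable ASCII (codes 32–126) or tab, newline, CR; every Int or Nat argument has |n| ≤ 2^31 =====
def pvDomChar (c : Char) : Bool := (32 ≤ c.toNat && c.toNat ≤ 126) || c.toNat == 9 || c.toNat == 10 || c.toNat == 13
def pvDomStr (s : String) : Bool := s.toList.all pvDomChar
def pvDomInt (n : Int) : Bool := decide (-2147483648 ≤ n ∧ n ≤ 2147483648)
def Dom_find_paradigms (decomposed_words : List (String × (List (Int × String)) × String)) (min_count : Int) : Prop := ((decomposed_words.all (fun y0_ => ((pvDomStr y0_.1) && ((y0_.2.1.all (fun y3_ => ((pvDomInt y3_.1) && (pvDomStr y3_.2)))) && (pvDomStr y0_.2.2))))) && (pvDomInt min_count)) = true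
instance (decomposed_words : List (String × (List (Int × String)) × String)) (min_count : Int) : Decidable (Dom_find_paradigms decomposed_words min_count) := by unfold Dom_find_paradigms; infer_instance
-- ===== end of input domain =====

-- B replaces A's per-blank rescan of all slots (building and joining the whole part list once
-- per blanked slot) by cumulative prefix/suffix join arrays computed in one forward and one
-- backward scan, each template being a single three-piece concatenation; objective: alternative.

-- ===== PORT A =====
-- module constant ZONE_NAMES (a dict literal)
def ZONE_NAMES : PySem.Dict Int String := PySem.Dict.ofList
  [(0, "prefix.initial"), (1, "prefix.glide"), (2, "prefix.liquid"),
   (3, "root.gallows"), (4, "root.compound"), (5, "root.bench"),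
   (6, "root.mid"), (7, "root.vowel"),
   (9, "suffix.i-series"), (10, "suffix.final"), (11, "suffix.terminal")]

-- f"[{ZONE_NAMES.get(s, s)}=___]" : the dict value if present, else str(s)
def pvZoneBlank (s : Int) : String :=
  "[" ++ ((ZONE_NAMES.get? s).getD (PySem.Int.toStr s)) ++ "=___]"

-- slots[s] ; s always ranges over the keys of slots, so the "" default is never read
def pvSlotVal (slots : List (Int × String)) (s : Int) : String :=
  (PySem.Dict.ofList slots).getD s ""

-- sorted(slots.keys())
def pvFilled (slots : List (Int × String)) : List Int :=
  PySem.List.sorted (PySem.Dict.ofList slots).keys (fun s => s)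

-- f"{s}:{slots[s]}"
def pvPart (slots : List (Int × String)) (s : Int) : String :=
  PySem.Int.toStr s ++ ":" ++ pvSlotVal slots s

-- paradigms[template][slots[blank_slot]] += 1 on nested defaultdicts
def pvBump (par : PySem.Dict String (PySem.Dict String Int)) (t v : String) :
    PySem.Dict String (PySem.Dict String Int) :=
  par.modify t PySem.Dict.empty (fun inner => inner.modify v 0 (· + 1))

def find_paradigms (decomposed_words : List (String × (List (Int × String)) × String)) (min_count : Int) : List (String × List (String × Int)) :=
  let paradigms : PySem.Dict String (PySem.Dict String Int) :=
    decomposed_words.foldl (fun par wp =>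
      let slots := wp.2.1
      let filled_slots := pvFilled slots
      filled_slots.foldl (fun par blank_slot =>
        let template_parts : List String :=
          filled_slots.foldl (fun acc s =>
            acc ++ [if s == blank_slot then pvZoneBlank s else pvPart slots s]) []
        let template := PySem.Str.join " " template_parts
        pvBump par template (pvSlotVal slots blank_slot)) par) PySem.Dict.empty
  -- real_paradigms: a fresh dict filled in iteration order; rendered as its items list
  let real_paradigms : PySem.Dict String (PySem.Dict String Int) :=
    paradigms.items.foldl (fun acc tv =>
      if 2 ≤ tv.2.size ∧ min_count ≤ tv.2.values.sum then acc.insert tv.1 tv.2 else acc)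
      PySem.Dict.empty
  real_paradigms.items.map (fun tv => (tv.1, tv.2.items))

-- ===== PORT B =====
def find_paradigms_alt (decomposed_words : List (String × (List (Int × String)) × String)) (min_count : Int) : List (String × List (String × Int)) :=
  let counts : PySem.Dict String (PySem.Dict String Int) :=
    decomposed_words.foldl (fun counts wp =>
      let slots := wp.2.1
      let filled := pvFilled slots
      let parts := filled.map (pvPart slots)
      -- pre = [""]; for p in parts: cur = cur + p + " "; pre.append(cur)   (state = (pre, cur))
      let preSt := parts.foldl (fun st p => (st.1 ++ [st.2 ++ p ++ " "], st.2 ++ p ++ " "))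
        (([""], "") : List String × String)
      -- suf built over reversed(parts) with cur = " " + p + cur, then suf.reverse()
      let sufSt := parts.reverse.foldl (fun st p => (st.1 ++ [" " ++ p ++ st.2], " " ++ p ++ st.2))
        (([""], "") : List String × String)
      let suf := sufSt.1.reverse
      -- enumerate(filled): zipIdx yields the (element, index) pairs e; the list indices
      -- pre[i] and suf[i+1] are always in range (i < len(filled) = len(pre) - 1), so getD is exact
      filled.zipIdx.foldl (fun counts e =>
        let template := preSt.1.getD e.2 "" ++ pvZoneBlank e.1 ++ suf.getD (e.2 + 1) ""
        counts.modify template PySem.Dict.empty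
          (fun vals => vals.insert (pvSlotVal slots e.1) (vals.getD (pvSlotVal slots e.1) 0 + 1)))
        counts) PySem.Dict.empty
  -- {t: v for t, v in counts.items() if ...} : a fresh dict filled in iteration order
  let kept : PySem.Dict String (PySem.Dict String Int) :=
    counts.items.foldl (fun acc tv =>
      if 2 ≤ tv.2.size ∧ min_count ≤ tv.2.values.sum then acc.insert tv.1 tv.2 else acc)
      PySem.Dict.empty
  kept.items.map (fun tv => (tv.1, tv.2.items))

-- ===== PRECONDITION & SPEC =====
def Spec_find_paradigms (decomposed_words : List (String × (List (Int × String)) × String)) (min_count : Int) (out : List (String × List (String × Int))) : Prop := out = find_paradigms_alt decomposed_words min_count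
instance (decomposed_words : List (String × (List (Int × String)) × String)) (min_count : Int) (out : List (String × List (String × Int))) : Decidable (Spec_find_paradigms decomposed_words min_count out) := by unfold Spec_find_paradigms; infer_instance

-- ===== CLAIM (what is proved, stated in full; the proofs are below) =====
def Claim_equal_find_paradigms : Prop := ∀ (decomposed_words : List (String × (List (Int × String)) × String)) (min_count : Int), Dom_find_paradigms decomposed_words min_count → Spec_find_paradigms decomposed_words min_count (find_paradigms decomposed_words min_count)

-- ===== LEMMAS AND PROOFS =====

-- char-level concatenations of the prefix parts (each followed by ' ') and suffix parts (each preceded by ' ')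
def pvPreC (l : List (List Char)) : List Char := (l.map (fun x => x ++ [' '])).flatten
def pvSufC (l : List (List Char)) : List Char := (l.map (fun x => ' ' :: x)).flatten

-- string-level: the running prefix/suffix joins B maintains
def pvPreF (xs : List String) : String := xs.foldl (fun c p => c ++ p ++ " ") ""
def pvSufF (xs : List String) : String := xs.foldr (fun p c => " " ++ p ++ c) ""

-- the (template, value) pairs one word contributes, as A builds them
def pvPairsA (slots : List (Int × String)) : List (String × String) :=
  (pvFilled slots).map (fun b =>
    (PySem.Str.join " " ((pvFilled slots).map
        (fun s => if s == b then pvZoneBlank s else pvPart slots s)),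
     pvSlotVal slots b))

-- the same pairs as B builds them, with the pre/suf arrays in characterized form
def pvPairsB (slots : List (Int × String)) : List (String × String) :=
  ((pvFilled slots).zipIdx).map (fun e =>
    (((List.range (((pvFilled slots).map (pvPart slots)).length + 1)).map
        (fun i => pvPreF (((pvFilled slots).map (pvPart slots)).take i))).getD e.2 ""
      ++ pvZoneBlank e.1 ++
      (((List.range (((pvFilled slots).map (pvPart slots)).length + 1)).map
        (fun i => pvSufF (((pvFilled slots).map (pvPart slots)).drop
          (((pvFilled slots).map (pvPart slots)).length - i)))).reverse).getD (e.2 + 1) "",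
     pvSlotVal slots e.1))

theorem pv_str_ext (a b : String) (h : a.toList = b.toList) : a = b := by
  have := congrArg String.ofList h; simpa using this

theorem pvJoinC_cons : ∀ (l2 : List (List Char)) (m : List Char),
    PySem.Chars.join [' '] (m :: l2) = m ++ pvSufC l2 := by
  intro l2
  induction l2 with
  | nil => intro m; simp [PySem.Chars.join_singleton, pvSufC]
  | cons y r ih =>
    intro m
    rw [PySem.Chars.join_cons_cons, ih y]
    simp [pvSufC]


theorem pvJoinC : ∀ (l1 l2 : List (List Char)) (m : List Char),
    PySem.Chars.join [' '] (l1 ++ m :: l2) = pvPreC l1 ++ m ++ pvSufC l2 := by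
  intro l1
  induction l1 with
  | nil => intro l2 m; simp [pvPreC, pvJoinC_cons]
  | cons x r ih =>
    intro l2 m
    have hne : r ++ m :: l2 ≠ [] := by simp
    obtain ⟨q, rest, hq⟩ := List.exists_cons_of_ne_nil hne
    rw [List.cons_append, hq, PySem.Chars.join_cons_cons, ← hq, ih]
    simp [pvPreC]

theorem pv_toList_preF : ∀ (xs : List String) (c : String),
    (xs.foldl (fun c p => c ++ p ++ " ") c).toList = c.toList ++ pvPreC (xs.map String.toList) := by
  intro xs
  induction xs with
  | nil => intro c; simp [pvPreC]
  | cons p r ih =>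
    intro c
    rw [List.foldl_cons, ih]
    simp [pvPreC]


theorem pv_toList_sufF : ∀ (xs : List String),
    (pvSufF xs).toList = pvSufC (xs.map String.toList) := by
  intro xs
  induction xs with
  | nil => simp [pvSufF, pvSufC]
  | cons p r ih =>
    show (" " ++ p ++ pvSufF r).toList = _
    rw [String.toList_append, String.toList_append, ih]
    simp [pvSufC]


theorem pvJoin_split (xs ys : List String) (m : String) :
    PySem.Str.join " " (xs ++ m :: ys) = pvPreF xs ++ m ++ pvSufF ys := by
  apply pv_str_ext
  rw [PySem.Str.toList_join]
  rw [String.toList_append, String.toList_append]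
  rw [List.map_append, List.map_cons]
  have hsep : (" " : String).toList = [' '] := by decide
  rw [hsep, pvJoinC]
  rw [show (pvPreF xs).toList = pvPreC (xs.map String.toList) from by
    simpa using pv_toList_preF xs ""]
  rw [pv_toList_sufF]


theorem pvPreFold (parts : List String) :
    parts.foldl (fun st p => (st.1 ++ [st.2 ++ p ++ " "], st.2 ++ p ++ " "))
      (([""], "") : List String × String)
    = ((List.range (parts.length + 1)).map (fun i => pvPreF (parts.take i)), pvPreF parts) := by
  induction parts using List.reverseRecOn with
  | nil => simp [pvPreF]
  | append_singleton ps p ih =>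
    rw [List.foldl_append, ih, List.foldl_cons, List.foldl_nil]
    have h2 : pvPreF (ps ++ [p]) = pvPreF ps ++ p ++ " " := by
      simp [pvPreF, List.foldl_append]
    refine Prod.ext ?_ (by dsimp only; exact h2.symm)
    show (List.range (ps.length + 1)).map (fun i => pvPreF (ps.take i)) ++ [pvPreF ps ++ p ++ " "]
      = (List.range ((ps ++ [p]).length + 1)).map (fun i => pvPreF ((ps ++ [p]).take i))
    rw [List.length_append, List.length_singleton, List.range_succ (n := ps.length + 1),
      List.map_append]
    congr 1
    · apply List.map_congr_left
      intro i hi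
      have : i ≤ ps.length := by simpa [Nat.lt_succ_iff] using List.mem_range.mp hi
      rw [List.take_append_of_le_length this]
    · simp only [List.map_cons, List.map_nil]
      rw [List.take_of_length_le (by simp)]
      simp [h2]


theorem pvSufFold (parts : List String) :
    parts.reverse.foldl (fun st p => (st.1 ++ [" " ++ p ++ st.2], " " ++ p ++ st.2))
      (([""], "") : List String × String)
    = ((List.range (parts.length + 1)).map
        (fun i => pvSufF (parts.drop (parts.length - i))), pvSufF parts) := by
  induction parts with
  | nil => simp [pvSufF]
  | cons p ps ih =>
    rw [List.reverse_cons, List.foldl_append, ih, List.foldl_cons, List.foldl_nil]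
    have h2 : (" " ++ p ++ pvSufF ps) = pvSufF (p :: ps) := rfl
    refine Prod.ext ?_ (by dsimp only; exact h2)
    show (List.range (ps.length + 1)).map (fun i => pvSufF (ps.drop (ps.length - i)))
        ++ [" " ++ p ++ pvSufF ps]
      = (List.range ((p :: ps).length + 1)).map
          (fun i => pvSufF ((p :: ps).drop ((p :: ps).length - i)))
    rw [List.length_cons, List.range_succ (n := ps.length + 1), List.map_append]
    congr 1
    · apply List.map_congr_left
      intro i hi
      have hle : i ≤ ps.length := by simpa [Nat.lt_succ_iff] using List.mem_range.mp hi
      have : ps.length + 1 - i = (ps.length - i) + 1 := by omega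
      rw [this, List.drop_succ_cons]
    · simp [h2]


theorem pvPre_getD (parts : List String) (i : Nat) (h : i ≤ parts.length) :
    ((List.range (parts.length + 1)).map (fun j => pvPreF (parts.take j))).getD i ""
      = pvPreF (parts.take i) := by
  have hlen : i < ((List.range (parts.length + 1)).map (fun j => pvPreF (parts.take j))).length := by
    simpa using Nat.lt_succ_of_le h
  rw [List.getD_eq_getElem _ _ hlen]
  simp


theorem pvSuf_getD (parts : List String) (j : Nat) (h : j ≤ parts.length) :
    (((List.range (parts.length + 1)).map
        (fun i => pvSufF (parts.drop (parts.length - i)))).reverse).getD j ""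
      = pvSufF (parts.drop j) := by
  have hlen : j < (((List.range (parts.length + 1)).map
      (fun i => pvSufF (parts.drop (parts.length - i)))).reverse).length := by
    simpa using Nat.lt_succ_of_le h
  rw [List.getD_eq_getElem _ _ hlen]
  rw [List.getElem_reverse]
  simp only [List.getElem_map, List.getElem_range, List.length_map, List.length_range]
  congr 2
  omega


-- splice: blanking by value equals splicing at the index, on a Nodup list
theorem pv_splice {β : Type} (f gg : Int → β) :
    ∀ (fs : List Int) (i : Nat) (h : i < fs.length), fs.Nodup →
      fs.map (fun s => if s == fs[i] then gg s else f s)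
        = (fs.map f).take i ++ [gg fs[i]] ++ (fs.map f).drop (i + 1) := by
  intro fs
  induction fs with
  | nil => intro i h; simp at h
  | cons x xs ih =>
    intro i h hnd
    rcases List.nodup_cons.mp hnd with ⟨hx, hxs⟩
    cases i with
    | zero =>
      simp only [List.getElem_cons_zero, List.map_cons, List.take_zero, List.nil_append,
        List.drop_succ_cons, List.drop_zero, List.cons_append]
      rw [List.cons_eq_cons]
      refine ⟨by simp, ?_⟩
      apply List.map_congr_left
      intro s hs
      have hne : s ≠ x := fun e => hx (e ▸ hs)
      simp [hne]
    | succ i =>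
      have hi : i < xs.length := by simpa using h
      have hin : xs[i] ∈ xs := List.getElem_mem hi
      have hne : x ≠ xs[i] := fun e => hx (e ▸ hin)
      have hh : (x == xs[i]) = false := by simpa using hne
      simp only [List.getElem_cons_succ, List.map_cons, List.take_succ_cons,
        List.drop_succ_cons, List.cons_append]
      simp only [hh, Bool.false_eq_true, if_false]
      exact congrArg (fun ys => f x :: ys) (ih i hi hxs)

theorem pvPairsA_eq_pairsB (slots : List (Int × String)) :
    pvPairsA slots = pvPairsB slots := by
  have hnd : (pvFilled slots).Nodup :=
    ((PySem.List.sorted_perm (PySem.Dict.ofList slots).keys (fun s => s) false).nodup_iff).mpr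
      (PySem.Dict.nodup_keys_ofList slots)
  unfold pvPairsA pvPairsB
  apply List.ext_getElem
  · simp
  · intro i h1 h2
    have hi : i < (pvFilled slots).length := by simpa using h1
    have hip : i ≤ ((pvFilled slots).map (pvPart slots)).length := by
      simpa using Nat.le_of_lt hi
    have hip1 : i + 1 ≤ ((pvFilled slots).map (pvPart slots)).length := by
      simpa using hi
    simp only [List.getElem_map, List.getElem_zipIdx, Nat.zero_add]
    rw [pv_splice (pvPart slots) pvZoneBlank (pvFilled slots) i hi hnd,
      List.append_assoc, List.singleton_append, pvJoin_split,
      pvPre_getD _ i hip, pvSuf_getD _ (i + 1) hip1]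

-- one word's inner loop of A, as a fold over its pair list
theorem pvInnerA (slots : List (Int × String)) (par : PySem.Dict String (PySem.Dict String Int)) :
    (pvFilled slots).foldl (fun par blank_slot =>
        pvBump par
          (PySem.Str.join " " ((pvFilled slots).foldl (fun acc s =>
            acc ++ [if s == blank_slot then pvZoneBlank s else pvPart slots s]) []))
          (pvSlotVal slots blank_slot)) par
      = (pvPairsA slots).foldl (fun par p => pvBump par p.1 p.2) par := by
  unfold pvPairsA
  rw [List.foldl_map]
  simp only [PySem.List.foldl_append_singleton_eq_map, List.nil_append]

-- one word's inner loop of B, as a fold over its pair list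
theorem pvInnerB (slots : List (Int × String)) (c : PySem.Dict String (PySem.Dict String Int)) :
    ((pvFilled slots).zipIdx).foldl (fun counts e =>
        counts.modify
          ((((pvFilled slots).map (pvPart slots)).foldl
              (fun st p => (st.1 ++ [st.2 ++ p ++ " "], st.2 ++ p ++ " "))
              (([""], "") : List String × String)).1.getD e.2 ""
            ++ pvZoneBlank e.1 ++
            ((((pvFilled slots).map (pvPart slots)).reverse.foldl
              (fun st p => (st.1 ++ [" " ++ p ++ st.2], " " ++ p ++ st.2))
              (([""], "") : List String × String)).1.reverse).getD (e.2 + 1) "")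
          PySem.Dict.empty
          (fun vals => vals.insert (pvSlotVal slots e.1) (vals.getD (pvSlotVal slots e.1) 0 + 1))) c
      = (pvPairsB slots).foldl (fun c p =>
          c.modify p.1 PySem.Dict.empty
            (fun vals => vals.insert p.2 (vals.getD p.2 0 + 1))) c := by
  unfold pvPairsB
  conv_rhs => rw [List.foldl_map]
  simp only [pvPreFold, pvSufFold]

-- A's bump step and B's modify/insert step are the same function
theorem pvStep_eq :
    (fun (par : PySem.Dict String (PySem.Dict String Int)) (p : String × String) =>
        pvBump par p.1 p.2)
      = (fun (c : PySem.Dict String (PySem.Dict String Int)) (p : String × String) =>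
        c.modify p.1 PySem.Dict.empty (fun vals => vals.insert p.2 (vals.getD p.2 0 + 1))) := by
  rfl

theorem pv_main : ∀ (decomposed_words : List (String × (List (Int × String)) × String)) (min_count : Int),
    find_paradigms decomposed_words min_count = find_paradigms_alt decomposed_words min_count := by
  intro dw mc
  unfold find_paradigms find_paradigms_alt
  simp only [pvInnerA, pvInnerB, pvPairsA_eq_pairsB, pvStep_eq]

-- ===== VERDICT (by name: the statement is the Claim_ definition above) =====
theorem find_paradigms_spec : Claim_equal_find_paradigms := by
  intro dw mc _
  unfold Spec_find_paradigms
  exact pv_main dw mc
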